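-- pv_equiv track=rewrite | github.com/mmfox/857project | ufe.py | pad_message_CBC
-- ===== SOURCE A (Python) =====
-- import math
--
-- def pad_message_CBC(message):
--     # TODO
--     # pad message so that it is a multiple of 16 bytes
--     # returns a list of plaintexts in 16 byte blocks and the number of blocks
--     message_bytes = [ ord(c) for c in message ]
--     padded_blocks = []
--     numBlocks = int(math.ceil(len(message_bytes)/16.0))
--     # pad
--     for i in range((numBlocks*16) - len(message_bytes)):
--         # TODO change the padding structure so we don't change the final letter of the message
--         message_bytes.append(0)
--     for i in range(numBlocks):
--         block = message_bytes[i*16:(i+1)*16]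
--         string_block = []
--         for b in block:
--             string_block.append(chr(b))
--         padded_blocks.append(string_block)
--
--     return (padded_blocks, numBlocks)
-- ===== SOURCE B (Python) =====
-- def pad_message_CBC(message):
--     # One pass over the characters: collect blocks of 16, pad the last partial block.
--     blocks = []
--     cur = []
--     for c in message:
--         cur.append(c)
--         if len(cur) == 16:
--             blocks.append(cur)
--             cur = []
--     if cur:
--         cur = cur + [chr(0)] * (16 - len(cur))
--         blocks.append(cur)
--     return (blocks, len(blocks))
-- ===== Notes on version B (the rewrite author's own statement) =====
-- stated objective: simpler
-- what changed: Replaces A's ord/chr byte round-trip, float-ceil block count and index-sliced second pass with a single fold over the characters that emits each block as it fills and pads only the final partial block.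
import Mathlib
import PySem

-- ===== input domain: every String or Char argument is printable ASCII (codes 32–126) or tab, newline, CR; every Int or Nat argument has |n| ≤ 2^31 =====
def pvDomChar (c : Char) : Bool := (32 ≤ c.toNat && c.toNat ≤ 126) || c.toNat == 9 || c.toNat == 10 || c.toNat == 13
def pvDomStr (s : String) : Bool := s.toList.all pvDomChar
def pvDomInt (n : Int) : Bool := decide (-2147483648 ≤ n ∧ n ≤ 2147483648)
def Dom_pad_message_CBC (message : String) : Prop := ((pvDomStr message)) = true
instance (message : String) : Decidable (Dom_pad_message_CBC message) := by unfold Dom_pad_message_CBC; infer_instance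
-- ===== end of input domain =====

-- B replaces A's ord/chr round-trip, ceil-formula and index-sliced second pass by one fold over the
-- characters that cuts blocks of 16 as they fill and pads only the final partial block (objective: simpler).

-- ===== PORT A =====
-- A's body over the message's character list (Python iterates the str's characters)
def padA (cs : List Char) : List (List String) × Int :=
  let message_bytes : List Int := cs.map (fun c => ((c.toNat : Int)))
  -- int(math.ceil(len(message_bytes)/16.0)): float ceil is exact here (length ≤ 2^31 on Dom), = (len+15)/16
  let numBlocks : Int := ((message_bytes.length + 15) / 16 : Nat)
  let message_bytes2 : List Int :=
    (PySem.List.pyRange 0 (numBlocks * 16 - (message_bytes.length : Int)) 1).foldl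
      (fun acc _ => acc ++ [(0 : Int)]) message_bytes
  let padded_blocks : List (List String) :=
    (PySem.List.pyRange 0 numBlocks 1).foldl
      (fun pbs i =>
        let block := PySem.List.slice message_bytes2 (some (i * 16)) (some ((i + 1) * 16))
        let string_block := block.foldl (fun sb b => sb ++ [String.ofList [Char.ofNat b.toNat]]) []
        pbs ++ [string_block]) []
  (padded_blocks, numBlocks)

def pad_message_CBC (message : String) : List (List String) × Int := padA message.toList

-- ===== PORT B =====
-- one step of B's loop body (append the char; emit the block when it reaches 16)
def padBstep (st : List (List String) × List String) (c : Char) : List (List String) × List String :=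
  let cur := st.2 ++ [String.ofList [c]]
  if cur.length == 16 then (st.1 ++ [cur], []) else (st.1, cur)

-- B's body over the message's character list
def padB (cs : List Char) : List (List String) × Int :=
  let st := cs.foldl padBstep ([], [])
  let blocks :=
    if st.2 = [] then st.1
    else st.1 ++ [st.2 ++ List.replicate (16 - st.2.length) (String.ofList [Char.ofNat 0])]
  (blocks, (blocks.length : Int))

def pad_message_CBC_alt (message : String) : List (List String) × Int := padB message.toList

-- ===== PRECONDITION & SPEC =====
def Spec_pad_message_CBC (message : String) (out : List (List String) × Int) : Prop := out = pad_message_CBC_alt message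
instance (message : String) (out : List (List String) × Int) : Decidable (Spec_pad_message_CBC message out) := by unfold Spec_pad_message_CBC; infer_instance

-- ===== CLAIM (what is proved, stated in full; the proofs are below) =====
def Claim_equal_pad_message_CBC : Prop := ∀ (message : String), Dom_pad_message_CBC message → Spec_pad_message_CBC message (pad_message_CBC message)

-- ===== LEMMAS AND PROOFS =====

-- abbreviation used only by the proofs: one character as a one-character string
def toS (c : Char) : String := String.ofList [c]

-- A's blocks, characterised: numBlocks blocks read off the zero-padded byte list by take/drop
theorem padA_eq (cs : List Char) :
    padA cs = (((List.range ((cs.length + 15) / 16)).map (fun k =>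
        (List.take 16 (List.drop (16 * k)
          (cs.map (fun c => ((c.toNat : Int))) ++
           List.replicate (16 * ((cs.length + 15) / 16) - cs.length) (0 : Int)))).map
          (fun b => String.ofList [Char.ofNat b.toNat]))),
      (((cs.length + 15) / 16 : Nat) : Int)) := by
  unfold padA
  dsimp only
  simp only [List.length_map]
  have h2 := PySem.List.foldl_append_singleton_eq_map (fun _ : Int => (0 : Int))
      (PySem.List.pyRange 0 ((((cs.length + 15) / 16 : Nat) : Int) * 16 - (cs.length : Int)) 1)
      (cs.map (fun c => ((c.toNat : Int))))
  beta_reduce at h2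
  rw [h2, List.map_const', PySem.List.length_pyRange_one]
  have h1 : ((((cs.length + 15) / 16 : Nat) : Int) * 16 - (cs.length : Int) - 0).toNat
      = 16 * ((cs.length + 15) / 16) - cs.length := by omega
  rw [h1]
  have h3 := PySem.List.foldl_append_singleton_eq_map
      (fun i : Int => ((PySem.List.slice
          (cs.map (fun c => ((c.toNat : Int))) ++
            List.replicate (16 * ((cs.length + 15) / 16) - cs.length) (0 : Int))
          (some (i * 16)) (some ((i + 1) * 16))).foldl
            (fun sb b => sb ++ [String.ofList [Char.ofNat b.toNat]]) []))
      (PySem.List.pyRange 0 (((cs.length + 15) / 16 : Nat) : Int) 1) []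
  beta_reduce at h3
  rw [h3, List.nil_append, PySem.List.pyRange_one]
  simp only [sub_zero, Int.toNat_natCast, List.map_map]
  refine Prod.ext ?_ rfl
  apply List.map_congr_left
  intro k hk
  dsimp only [Function.comp]
  have e1 : ((0 : Int) + (k : Int)) * 16 = ((16 * k : Nat) : Int) := by push_cast; ring
  have e2 : ((0 : Int) + (k : Int) + 1) * 16 = ((16 * k + 16 : Nat) : Int) := by push_cast; ring
  rw [e1, e2, PySem.List.slice_natCast]
  have e3 : 16 * k + 16 - 16 * k = 16 := by omega
  rw [e3]
  have h4 := PySem.List.foldl_append_singleton_eq_map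
      (fun b : Int => String.ofList [Char.ofNat b.toNat])
      (List.take 16 (List.drop (16 * k)
        (cs.map (fun c => ((c.toNat : Int))) ++
          List.replicate (16 * ((cs.length + 15) / 16) - cs.length) (0 : Int)))) []
  beta_reduce at h4
  rw [h4, List.nil_append]

-- B's loop only appends to the block list: the accumulator splits off
theorem padB_shift (l : List Char) (bs : List (List String)) (cur : List String) :
    l.foldl padBstep (bs, cur) =
      (bs ++ (l.foldl padBstep ([], cur)).1, (l.foldl padBstep ([], cur)).2) := by
  induction l generalizing bs cur with
  | nil => simp
  | cons c l ih =>
    simp only [List.foldl_cons, padBstep, List.nil_append]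
    split
    · rw [ih (bs ++ [cur ++ [String.ofList [c]]]) [], ih [cur ++ [String.ofList [c]]] []]
      simp
    · exact ih bs (cur ++ [String.ofList [c]])

-- fewer than 16 characters in flight: no block is emitted
theorem padB_small (l : List Char) (cur : List String) (bs : List (List String))
    (h : cur.length + l.length < 16) :
    l.foldl padBstep (bs, cur) = (bs, cur ++ l.map toS) := by
  induction l generalizing cur with
  | nil => simp
  | cons c l ih =>
    simp only [List.foldl_cons, padBstep]
    rw [if_neg (by have h' := h; simp at h' ⊢; omega)]
    rw [ih (cur ++ [String.ofList [c]]) (by have h' := h; simp at h' ⊢; omega)]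
    simp [toS]

-- exactly 16 characters in flight: one full block is emitted and the buffer clears
theorem padB_full (l : List Char) (cur : List String) (bs : List (List String))
    (hne : l ≠ []) (h : cur.length + l.length = 16) :
    l.foldl padBstep (bs, cur) = (bs ++ [cur ++ l.map toS], []) := by
  induction l generalizing cur bs with
  | nil => simp at hne
  | cons c l ih =>
    simp only [List.foldl_cons, padBstep]
    rcases List.eq_nil_or_concat l with hl | _
    · subst hl
      simp at h
      rw [if_pos (by simp; omega)]
      simp [toS]
    · have hl : l ≠ [] := by rintro rfl; simp_all
      have hp : 0 < l.length := List.length_pos_of_ne_nil hl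
      rw [if_neg (by have h' := h; simp at h' ⊢; omega)]
      rw [ih (cur ++ [String.ofList [c]]) bs hl (by have h' := h; simp at h' ⊢; omega)]
      simp [toS]

-- the two char-to-string conversions agree: chr(ord(c)) = c
theorem chr_ord (c : Char) : String.ofList [Char.ofNat ((c.toNat : Int)).toNat] = toS c := by
  simp [toS, Char.ofNat_toNat]

theorem padA_eq_padB (cs : List Char) : padA cs = padB cs := by
  have H : ∀ n, ∀ cs : List Char, cs.length = n → padA cs = padB cs := by
    intro n
    induction n using Nat.strong_induction_on with
    | _ n ih =>
      intro cs hlen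
      subst hlen
      by_cases h16 : 16 ≤ cs.length
      · -- at least one full block: peel the first 16 characters off both programs
        set a := cs.take 16 with ha
        set r := cs.drop 16 with hr
        have hcs : cs = a ++ r := (List.take_append_drop 16 cs).symm
        have hal : a.length = 16 := by simp [ha]; omega
        have hane : a ≠ [] := by rintro h; rw [h] at hal; simp at hal
        have ihr : padA r = padB r := ih r.length (by simp [hr]; omega) r rfl
        have haveA : padA (a ++ r) = ((a.map toS) :: (padA r).1, (padA r).2 + 1) := by
          rw [padA_eq (a ++ r), padA_eq r]
          simp only [List.length_append, hal, List.map_append]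
          have hnb : (16 + r.length + 15) / 16 = (r.length + 15) / 16 + 1 := by omega
          rw [hnb]
          have hpad : 16 * ((r.length + 15) / 16 + 1) - (16 + r.length)
              = 16 * ((r.length + 15) / 16) - r.length := by omega
          rw [hpad, List.range_succ_eq_map, List.map_cons, List.map_map]
          refine Prod.ext ?_ (by push_cast; ring)
          dsimp only
          congr 1
          · have hl16 : (a.map (fun c => ((c.toNat : Int)))).length = 16 := by simp [hal]
            rw [Nat.mul_zero, List.drop_zero, List.append_assoc, ← hl16, List.take_left,
              List.map_map]
            exact List.map_congr_left (fun c _ => chr_ord c)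
          · apply List.map_congr_left
            intro k hk
            dsimp only [Function.comp]
            have hl16 : (a.map (fun c => ((c.toNat : Int)))).length = 16 := by simp [hal]
            have e1 : 16 * (k + 1) = (a.map (fun c => ((c.toNat : Int)))).length + 16 * k := by
              rw [hl16]; ring
            rw [List.append_assoc, e1, List.drop_length_add_append]
        have haveB : padB (a ++ r) = ((a.map toS) :: (padB r).1, (padB r).2 + 1) := by
          unfold padB
          dsimp only
          rw [List.foldl_append, padB_full a [] [] hane (by simp [hal]),
            padB_shift r ([] ++ [[] ++ a.map toS]) []]
          by_cases hst : (r.foldl padBstep ([], [])).2 = [] <;>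
            simp [hst]
        rw [hcs, haveA, haveB, ihr]
      · by_cases h0 : cs = []
        · subst h0; decide
        · -- a single partial block: A pads-and-slices it, B pads its buffer
          have hpos : 0 < cs.length := List.length_pos_of_ne_nil h0
          rw [padA_eq cs]
          have hnb : (cs.length + 15) / 16 = 1 := by omega
          rw [hnb, List.range_one, List.map_cons, List.map_nil]
          have hlen16 : (cs.map (fun c => ((c.toNat : Int))) ++
              List.replicate (16 * 1 - cs.length) (0 : Int)).length = 16 := by
            simp; omega
          rw [Nat.mul_zero, List.drop_zero, List.take_of_length_le (le_of_eq hlen16),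
            List.map_append, List.map_map, List.map_replicate]
          unfold padB
          dsimp only
          rw [padB_small cs [] [] (by simp; omega)]
          dsimp only
          simp only [List.nil_append]
          have hmne : cs.map toS ≠ [] := by simp [h0]
          rw [if_neg hmne]
          refine Prod.ext ?_ (by simp)
          dsimp only
          simp only [List.length_map]
          have e : (16 : Nat) * 1 - cs.length = 16 - cs.length := by omega
          rw [e]
          simp [Function.comp, toS]
  exact H cs.length cs rfl

-- ===== VERDICT (by name: the statement is the Claim_ definition above) =====
theorem pad_message_CBC_spec : Claim_equal_pad_message_CBC := by
  intro message _
  unfold Spec_pad_message_CBC pad_message_CBC pad_message_CBC_alt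
  exact padA_eq_padB message.toList
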